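-- pv_equiv track=rewrite | github.com/newbie1111/Programming-Contests | atcoder.jp/abc277/abc277_c/main.py | solve
-- ===== SOURCE A (Python) =====
-- from collections import deque, defaultdict
--
-- class Node():
--
--     def __init__(self, number: int) -> None:
--         self.number = number
--         self.nears = []
--         self.visited = False
--
-- def solve(N, A, B):
--     ans = 1
--
--     # graph init
--     nodes = {i: Node(i) for i in set(A + B + [1])}
--
--     for a, b in zip(A, B):
--         nodes[a].nears.append(b)
--         nodes[b].nears.append(a)
--
--     # BFS
--     que = deque([1])
--     while que:
--         current_id = que.popleft()
--         nodes[current_id].visited = True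
--         for nears_id in nodes[current_id].nears:
--             if not nodes[nears_id].visited:
--                 que.append(nears_id)
--                 ans = max(ans, nears_id)
--
--     return ans
-- ===== SOURCE B (Python) =====
-- def solve(N, A, B):
--     comp = {1}
--     edges = list(zip(A, B))
--     for _ in range(len(edges)):
--         size = len(comp)
--         for a, b in edges:
--             if a in comp or b in comp:
--                 comp.add(a)
--                 comp.add(b)
--         if len(comp) == size:
--             break
--     return max(comp)
-- ===== Notes on version B (the rewrite author's own statement) =====
-- stated objective: alternative
-- what changed: Replaces the object-graph build (Node class, adjacency lists) plus BFS with an explicit deque by iterated set closure: repeatedly sweep the zipped edge list absorbing any edge that touches the component of 1 until a sweep adds nothing, then return max of the component set.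
import Mathlib
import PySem

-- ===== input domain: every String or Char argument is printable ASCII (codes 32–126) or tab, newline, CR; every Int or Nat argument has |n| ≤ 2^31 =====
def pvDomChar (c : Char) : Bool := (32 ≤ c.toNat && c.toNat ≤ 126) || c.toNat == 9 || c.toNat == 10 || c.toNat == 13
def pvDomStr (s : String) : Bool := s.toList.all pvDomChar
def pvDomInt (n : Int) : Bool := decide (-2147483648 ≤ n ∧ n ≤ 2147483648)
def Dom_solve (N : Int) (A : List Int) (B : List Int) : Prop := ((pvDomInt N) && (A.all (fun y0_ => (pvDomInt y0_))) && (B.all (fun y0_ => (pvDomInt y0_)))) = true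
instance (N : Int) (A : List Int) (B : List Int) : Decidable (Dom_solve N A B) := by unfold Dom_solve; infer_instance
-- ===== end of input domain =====

-- B replaces A's Node-object graph + deque BFS by iterated edge-list closure of the
-- component of 1, then max of that set (objective: alternative; not claimed faster).

-- ===== PORT A =====
-- A builds nodes = {i: Node(i) for i in set(A+B+[1])}; we split the Node objects into
-- two dicts: nears (adjacency lists) and visited (flags).  Python set/dict iteration
-- order is not observable in the result (dicts are only used as maps).
def nodeSet (A B : List Int) : PySem.Set Int := PySem.Set.ofList (A ++ B ++ [1])

def initNears (A B : List Int) : PySem.Dict Int (List Int) :=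
  (nodeSet A B).foldl (fun d i => d.insert i ([] : List Int)) PySem.Dict.empty

def initVisited (A B : List Int) : PySem.Dict Int Bool :=
  (nodeSet A B).foldl (fun d i => d.insert i false) PySem.Dict.empty

-- for a, b in zip(A, B): nodes[a].nears.append(b); nodes[b].nears.append(a)
def buildNears (A B : List Int) : PySem.Dict Int (List Int) :=
  (A.zip B).foldl
    (fun d ab => (d.modify ab.1 [] (· ++ [ab.2])).modify ab.2 [] (· ++ [ab.1]))
    (initNears A B)

-- helper lemmas cited by the port (hn argument of bfsGo / its termination proof)
theorem getD_foldNears_mem (es : List (Int × Int)) (d : PySem.Dict Int (List Int))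
    (k n : Int) :
    n ∈ (es.foldl
      (fun d ab => (d.modify ab.1 [] (· ++ [ab.2])).modify ab.2 [] (· ++ [ab.1])) d).getD k []
    ↔ n ∈ d.getD k [] ∨ (k, n) ∈ es ∨ (n, k) ∈ es := by
  induction es generalizing d with
  | nil => simp
  | cons e es ih =>
    rw [List.foldl_cons, ih]
    simp only [PySem.Dict.getD_modify, List.mem_cons]
    by_cases hkb : k = e.2 <;> by_cases hka : k = e.1 <;>
      simp only [hkb, hka, if_true, if_false, eq_self_iff_true, List.mem_append,
        List.mem_singleton, Prod.ext_iff] <;>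
      first
        | tauto
        | (split_ifs with h <;>
            simp only [h, List.mem_append, List.mem_singleton, eq_self_iff_true,
              true_and, false_and] <;> tauto)

theorem getD_initNears (A B : List Int) (k : Int) : (initNears A B).getD k [] = [] := by
  unfold initNears
  have h : ∀ (l : List Int) (d : PySem.Dict Int (List Int)),
      (∀ k : Int, d.getD k [] = []) →
      ∀ k : Int, (l.foldl (fun d i => d.insert i ([] : List Int)) d).getD k [] = [] := by
    intro l
    induction l with
    | nil => intro d hd k; exact hd k
    | cons x xs ih =>
      intro d hd k
      exact ih _ (fun k' => by rw [PySem.Dict.getD_insert]; split <;> simp [hd]) k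
  exact h _ _ (fun k => by simp [PySem.Dict.getD_empty]) k

theorem buildNears_mem (A B : List Int) (k n : Int) :
    n ∈ (buildNears A B).getD k [] ↔ (k, n) ∈ A.zip B ∨ (n, k) ∈ A.zip B := by
  rw [buildNears, getD_foldNears_mem, getD_initNears]; simp

theorem buildNears_dom (A B : List Int) (k : Int)
    (h : (buildNears A B).getD k [] ≠ []) : k ∈ nodeSet A B := by
  obtain ⟨n, hn⟩ := List.exists_mem_of_ne_nil _ h
  rw [buildNears_mem] at hn
  have hk : k ∈ A ∨ k ∈ B := by
    rcases hn with h' | h'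
    · exact Or.inl (List.of_mem_zip h').1
    · exact Or.inr (List.of_mem_zip h').2
  rw [nodeSet, PySem.Set.mem_ofList]
  rcases hk with h' | h' <;> simp [h']

-- the neighbour loop in one BFS round (que extension and running max) as a filter
theorem bfsFold_eq (l : List Int) (vd : PySem.Dict Int Bool) (q0 : List Int) (a0 : Int) :
    l.foldl (fun (acc : List Int × Int) n =>
        if vd.getD n false then acc else (acc.1 ++ [n], max acc.2 n)) (q0, a0)
    = (q0 ++ l.filter (fun n => !(vd.getD n false)),
       (l.filter (fun n => !(vd.getD n false))).foldl max a0) := by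
  induction l generalizing q0 a0 with
  | nil => simp
  | cons x xs ih =>
    cases hx : vd.getD x false <;>
      simp [List.filter_cons, hx, ih, List.append_assoc]

theorem countP_lt_of {α : Type} (l : List α) (p q : α → Bool)
    (hpq : ∀ x ∈ l, p x = true → q x = true) (a : α) (ha : a ∈ l)
    (hqa : q a = true) (hpa : p a = false) : l.countP p < l.countP q := by
  induction l with
  | nil => cases ha
  | cons b t ih =>
    rcases List.mem_cons.mp ha with rfl | hat
    · have hle : t.countP p ≤ t.countP q :=
        List.countP_mono_left (fun x hx => hpq x (List.mem_cons_of_mem _ hx))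
      have h1 : (if p a = true then 1 else 0) = 0 := by simp [hpa]
      have h2 : (if q a = true then 1 else 0) = 1 := by simp [hqa]
      simp only [List.countP_cons]
      omega
    · have hlt := ih (fun x hx => hpq x (List.mem_cons_of_mem _ hx)) hat
      have hcb : (if p b = true then 1 else 0) ≤ (if q b = true then 1 else 0) := by
        split_ifs with h1 h2
        · omega
        · exact absurd (hpq b List.mem_cons_self h1) h2
        · omega
        · omega
      simp only [List.countP_cons]
      omega

-- BFS loop of A: pop left, mark visited, push unvisited neighbours, track running max.
-- hn is only needed for termination; the code is the literal loop body.
def bfsGo (ns : PySem.Set Int) (nears : PySem.Dict Int (List Int))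
    (hn : ∀ k : Int, nears.getD k [] ≠ [] → k ∈ ns)
    (visited : PySem.Dict Int Bool) (ans : Int) (que : List Int) : Int :=
  match que with
  | [] => ans
  | current :: rest =>
    let r := (nears.getD current []).foldl
        (fun (acc : List Int × Int) n =>
          if (visited.insert current true).getD n false then acc
          else (acc.1 ++ [n], max acc.2 n)) (rest, ans)
    bfsGo ns nears hn (visited.insert current true) r.2 r.1
termination_by (ns.countP (fun x => !(visited.getD x false)),
                que.countP (fun x => decide (x ∈ ns) && visited.getD x false),
                que.length)
decreasing_by
  simp only [dite_eq_ite]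
  rw [bfsFold_eq]
  have hgd : ∀ x : ℤ, (visited.insert current true).getD x false
      = if x = current then true else visited.getD x false :=
    fun x => PySem.Dict.getD_insert visited current x true false
  by_cases hns : current ∈ ns
  · cases hcur : visited.getD current false
    · -- newly visited node of ns: the unvisited count drops
      apply Prod.Lex.left
      apply countP_lt_of _ _ _ ?_ current hns ?_ ?_
      · intro x _ hx
        rw [hgd] at hx
        by_cases hxc : x = current
        · simp [hxc] at hx
        · simpa [hxc] using hx
      · simp [hcur]
      · simp [hgd]
    · -- already-visited node of ns: unvisited count equal, visited queue entries drop
      have h1 : List.countP (fun x => !(visited.insert current true).getD x false) ns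
          = List.countP (fun x => !visited.getD x false) ns := by
        refine List.countP_congr (fun x _ => ?_)
        rw [hgd]
        by_cases hxc : x = current <;> simp [hxc, hcur]
      rw [h1]
      apply Prod.Lex.right
      apply Prod.Lex.left
      have hF : List.countP (fun x => decide (x ∈ ns) && (visited.insert current true).getD x false)
          ((nears.getD current []).filter (fun n => !(visited.insert current true).getD n false)) = 0 := by
        refine List.countP_eq_zero.mpr (fun x hx => ?_)
        have := List.of_mem_filter hx
        simp only [Bool.not_eq_eq_eq_not, Bool.not_true] at this
        simp [this]
      have hrest : List.countP (fun x => decide (x ∈ ns) && (visited.insert current true).getD x false) rest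
          = List.countP (fun x => decide (x ∈ ns) && visited.getD x false) rest := by
        refine List.countP_congr (fun x _ => ?_)
        rw [hgd]
        by_cases hxc : x = current <;> simp [hxc, hcur]
      rw [List.countP_append, hF, hrest, List.countP_cons]
      simp [hns, hcur]
  · -- current outside the node set: its adjacency list is empty, the queue shrinks
    have hq : nears.getD current [] = [] := by
      by_contra h; exact hns (hn current h)
    have h1 : List.countP (fun x => !(visited.insert current true).getD x false) ns
        = List.countP (fun x => !visited.getD x false) ns := by
      refine List.countP_congr (fun x hx => ?_)
      have hxc : x ≠ current := fun h => hns (h ▸ hx)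
      rw [hgd]; simp [hxc]
    have h2 : List.countP (fun x => decide (x ∈ ns) && (visited.insert current true).getD x false) rest
        = List.countP (fun x => decide (x ∈ ns) && visited.getD x false) rest := by
      refine List.countP_congr (fun x _ => ?_)
      rw [hgd]
      by_cases hxc : x = current <;> simp [hxc, hns]
    rw [hq]
    simp only [List.filter_nil, List.append_nil]
    rw [h1, h2, List.countP_cons]
    have hz : (if (decide (current ∈ ns) && visited.getD current false) = true then 1 else 0) = 0 := by
      simp [hns]
    rw [hz, Nat.add_zero]
    apply Prod.Lex.right
    apply Prod.Lex.right
    simp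

def solve (N : Int) (A : List Int) (B : List Int) : Int :=
  bfsGo (nodeSet A B) (buildNears A B) (buildNears_dom A B)
    (initVisited A B) 1 [1]

-- ===== PORT B =====
-- one sweep of: for a, b in edges: if a in comp or b in comp: comp.add(a); comp.add(b)
def passOnce (E : List (Int × Int)) (S : PySem.Set Int) : PySem.Set Int :=
  E.foldl (fun s ab =>
    if s.contains ab.1 || s.contains ab.2 then (s.add ab.1).add ab.2 else s) S

-- the 'for _ in range(len(edges))' loop with its early 'break' once a sweep adds nothing
def closeLoop (E : List (Int × Int)) : Nat → PySem.Set Int → PySem.Set Int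
  | 0, S => S
  | Nat.succ k, S =>
    let size := S.length
    let S' := passOnce E S
    if S'.length = size then S' else closeLoop E k S'

def solve_alt (N : Int) (A : List Int) (B : List Int) : Int :=
  let edges := A.zip B
  let comp := closeLoop edges edges.length [1]
  -- max(comp): comp always contains 1, so max? is never none; 0 is an unreachable default
  (PySem.List.max? comp (fun x => x)).getD 0

-- ===== PRECONDITION & SPEC =====
def Spec_solve (N : Int) (A : List Int) (B : List Int) (out : Int) : Prop := out = solve_alt N A B
instance (N : Int) (A : List Int) (B : List Int) (out : Int) : Decidable (Spec_solve N A B out) := by unfold Spec_solve; infer_instance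

-- ===== CLAIM (what is proved, stated in full; the proofs are below) =====
def Claim_equal_solve : Prop := ∀ (N : Int) (A : List Int) (B : List Int), Dom_solve N A B → Spec_solve N A B (solve N A B)

-- ===== LEMMAS AND PROOFS =====

theorem getD_initVisited (A B : List Int) (k : Int) :
    (initVisited A B).getD k false = false := by
  unfold initVisited
  have h : ∀ (l : List Int) (d : PySem.Dict Int Bool),
      (∀ k : Int, d.getD k false = false) →
      ∀ k : Int, (l.foldl (fun d i => d.insert i false) d).getD k false = false := by
    intro l
    induction l with
    | nil => intro d hd k; exact hd k
    | cons x xs ih =>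
      intro d hd k
      exact ih _ (fun k' => by rw [PySem.Dict.getD_insert]; split <;> simp [hd]) k
  exact h _ _ (fun k => by simp [PySem.Dict.getD_empty]) k


-- undirected step along one listed edge, and reachability from node 1
def Estep (E : List (Int × Int)) (x y : Int) : Prop := (x, y) ∈ E ∨ (y, x) ∈ E

def Reach (E : List (Int × Int)) (v : Int) : Prop := Relation.ReflTransGen (Estep E) 1 v

-- "out is the maximum label of the component of 1"
def CompMax (E : List (Int × Int)) (out : Int) : Prop :=
  Reach E out ∧ ∀ v, Reach E v → v ≤ out

theorem isMax_unique {E : List (Int × Int)} {x y : Int}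
    (hx : CompMax E x) (hy : CompMax E y) : x = y :=
  le_antisymm (hy.2 x hx.1) (hx.2 y hy.1)

-- ---------- B side: iterated closure computes the component of 1 ----------

def passStep (s : PySem.Set Int) (ab : Int × Int) : PySem.Set Int :=
  if s.contains ab.1 || s.contains ab.2 then (s.add ab.1).add ab.2 else s

theorem passOnce_eq_foldl (E : List (Int × Int)) (S : PySem.Set Int) :
    passOnce E S = E.foldl passStep S := rfl

theorem passStep_append (S : PySem.Set Int) (e : Int × Int) :
    ∃ t, passStep S e = S ++ t := by
  unfold passStep
  by_cases hc : (S.contains e.1 || S.contains e.2) = true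
  · rw [if_pos hc]
    by_cases h1 : e.1 ∈ S
    · rw [PySem.Set.add_of_mem h1]
      by_cases h2 : e.2 ∈ S
      · rw [PySem.Set.add_of_mem h2]
        exact ⟨[], by simp⟩
      · rw [PySem.Set.add_of_not_mem h2]
        exact ⟨[e.2], rfl⟩
    · rw [PySem.Set.add_of_not_mem h1]
      by_cases h2 : e.2 ∈ S ++ [e.1]
      · rw [PySem.Set.add_of_mem h2]
        exact ⟨[e.1], rfl⟩
      · rw [PySem.Set.add_of_not_mem h2]
        exact ⟨[e.1] ++ [e.2], List.append_assoc S [e.1] [e.2]⟩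
  · rw [if_neg hc]
    exact ⟨[], by simp⟩

theorem foldPass_append (es : List (Int × Int)) (S : PySem.Set Int) :
    ∃ t, es.foldl passStep S = S ++ t := by
  induction es generalizing S with
  | nil => exact ⟨[], by simp⟩
  | cons e es ih =>
    obtain ⟨t0, h0⟩ := passStep_append S e
    obtain ⟨t1, h1⟩ := ih (S ++ t0)
    exact ⟨t0 ++ t1, by rw [List.foldl_cons, h0, h1, List.append_assoc]⟩

theorem foldPass_subset (es : List (Int × Int)) (S : PySem.Set Int) :
    ∀ x ∈ S, x ∈ es.foldl passStep S := by
  intro x hx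
  obtain ⟨t, ht⟩ := foldPass_append es S
  rw [ht]
  exact List.mem_append_left _ hx

theorem foldPass_fix (es : List (Int × Int)) (S : PySem.Set Int)
    (h : es.foldl passStep S = S) :
    ∀ ab ∈ es, (ab.1 ∈ S ∨ ab.2 ∈ S) → ab.1 ∈ S ∧ ab.2 ∈ S := by
  induction es generalizing S with
  | nil => intro ab hab; cases hab
  | cons e es ih =>
    rw [List.foldl_cons] at h
    obtain ⟨t0, h0⟩ := passStep_append S e
    have h2 := h
    rw [h0] at h2
    obtain ⟨t1, h1⟩ := foldPass_append es (S ++ t0)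
    rw [h1, List.append_assoc] at h2
    have hlen := congrArg List.length h2
    simp only [List.length_append] at hlen
    have ht0 : t0 = [] := by
      have : t0.length = 0 := by omega
      exact List.eq_nil_of_length_eq_zero this
    have hid : passStep S e = S := by rw [h0, ht0, List.append_nil]
    rw [hid] at h
    intro ab hab hor
    rcases List.mem_cons.mp hab with rfl | hab'
    · -- the identity step on a touching edge forces both endpoints inside
      have hc : (S.contains ab.1 || S.contains ab.2) = true := by
        rcases hor with h' | h' <;>
          simp [PySem.Set.contains_eq_listContains, h']
      have : (S.add ab.1).add ab.2 = S := by
        unfold passStep at hid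
        rwa [if_pos hc] at hid
      constructor
      · have : ab.1 ∈ (S.add ab.1).add ab.2 := by
          simp [PySem.Set.mem_add]
        rwa [‹(S.add ab.1).add ab.2 = S›] at this
      · have : ab.2 ∈ (S.add ab.1).add ab.2 := by
          simp [PySem.Set.mem_add]
        rwa [‹(S.add ab.1).add ab.2 = S›] at this
    · exact ih S h ab hab' hor

def intCount (E : List (Int × Int)) (S : PySem.Set Int) : Nat :=
  E.countP (fun ab => decide (ab.1 ∈ S) && decide (ab.2 ∈ S))

theorem foldPass_progress (es : List (Int × Int)) (E : List (Int × Int))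
    (hes : ∀ e ∈ es, e ∈ E) (S : PySem.Set Int)
    (h : es.foldl passStep S ≠ S) :
    intCount E S < intCount E (es.foldl passStep S) := by
  induction es generalizing S with
  | nil => exact absurd rfl h
  | cons e es ih =>
    rw [List.foldl_cons] at h ⊢
    by_cases h1 : passStep S e = S
    · rw [h1] at h ⊢
      exact ih (fun x hx => hes x (List.mem_cons_of_mem _ hx)) S h
    · -- the step really added something: edge e becomes internal
      have hc : (S.contains e.1 || S.contains e.2) = true := by
        by_contra hcc
        apply h1
        unfold passStep
        rw [if_neg hcc]
      have hS1 : passStep S e = (S.add e.1).add e.2 := by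
        unfold passStep; rw [if_pos hc]
      have hmem1 : e.1 ∈ passStep S e := by
        rw [hS1]; simp [PySem.Set.mem_add]
      have hmem2 : e.2 ∈ passStep S e := by
        rw [hS1]; simp [PySem.Set.mem_add]
      have hnot : ¬ (e.1 ∈ S ∧ e.2 ∈ S) := by
        rintro ⟨ha, hb⟩
        exact h1 (by rw [hS1, PySem.Set.add_of_mem ha, PySem.Set.add_of_mem hb])
      have hsub : ∀ x ∈ S, x ∈ passStep S e := by
        intro x hx
        obtain ⟨t, ht⟩ := passStep_append S e
        rw [ht]; exact List.mem_append_left _ hx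
      have hlt : intCount E S < intCount E (passStep S e) := by
        apply countP_lt_of _ _ _ ?_ e (hes e List.mem_cons_self) ?_ ?_
        · intro x _ hx
          simp only [Bool.and_eq_true, decide_eq_true_eq] at hx ⊢
          exact ⟨hsub _ hx.1, hsub _ hx.2⟩
        · simp [hmem1, hmem2]
        · by_cases hA : e.1 ∈ S <;> by_cases hB : e.2 ∈ S <;>
            simp [hA, hB] <;> exact hnot ⟨hA, hB⟩
      have hle : intCount E (passStep S e) ≤ intCount E (es.foldl passStep (passStep S e)) := by
        apply List.countP_mono_left
        intro x _ hx
        simp only [Bool.and_eq_true, decide_eq_true_eq] at hx ⊢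
        exact ⟨foldPass_subset _ _ _ hx.1, foldPass_subset _ _ _ hx.2⟩
      exact lt_of_lt_of_le hlt hle

theorem foldPass_reach (es E : List (Int × Int)) (hes : ∀ e ∈ es, e ∈ E)
    (S : PySem.Set Int) (hS : ∀ x ∈ S, Reach E x) :
    ∀ x ∈ es.foldl passStep S, Reach E x := by
  induction es generalizing S with
  | nil => exact hS
  | cons e es ih =>
    rw [List.foldl_cons]
    apply ih (fun x hx => hes x (List.mem_cons_of_mem _ hx))
    intro x hx
    unfold passStep at hx
    split at hx
    · rename_i hc
      have hone : e.1 ∈ S ∨ e.2 ∈ S := by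
        rcases Bool.or_eq_true_iff.mp hc with h' | h'
        · exact Or.inl (by simpa [PySem.Set.contains_eq_listContains] using h')
        · exact Or.inr (by simpa [PySem.Set.contains_eq_listContains] using h')
      have he : e ∈ E := hes e List.mem_cons_self
      have hr1 : Reach E e.1 := by
        rcases hone with h' | h'
        · exact hS _ h'
        · exact Relation.ReflTransGen.tail (hS _ h') (Or.inr (by simpa using he))
      have hr2 : Reach E e.2 := by
        rcases hone with h' | h'
        · exact Relation.ReflTransGen.tail (hS _ h') (Or.inl (by simpa using he))
        · exact hS _ h'
      rcases (PySem.Set.mem_add _ _ _).mp hx with hx' | rfl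
      · rcases (PySem.Set.mem_add _ _ _).mp hx' with hx'' | rfl
        · exact hS _ hx''
        · exact hr1
      · exact hr2
    · exact hS _ hx

theorem foldPass_id (es : List (Int × Int)) (S : PySem.Set Int)
    (h : ∀ ab ∈ es, ab.1 ∈ S ∧ ab.2 ∈ S) : es.foldl passStep S = S := by
  induction es with
  | nil => rfl
  | cons e es ih =>
    have he := h e List.mem_cons_self
    have hid : passStep S e = S := by
      unfold passStep
      split
      · rw [PySem.Set.add_of_mem he.1, PySem.Set.add_of_mem he.2]
      · rfl
    rw [List.foldl_cons, hid]
    exact ih (fun ab hab => h ab (List.mem_cons_of_mem _ hab))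

theorem closeLoop_subset (E : List (Int × Int)) (k : Nat) (S : PySem.Set Int) :
    ∀ x ∈ S, x ∈ closeLoop E k S := by
  induction k generalizing S with
  | zero => intro x hx; exact hx
  | succ k ih =>
    intro x hx
    show x ∈ (if (passOnce E S).length = S.length then passOnce E S else closeLoop E k (passOnce E S))
    have hx' : x ∈ passOnce E S := by
      rw [passOnce_eq_foldl]
      exact foldPass_subset _ _ _ hx
    split
    · exact hx'
    · exact ih _ x hx'

theorem closeLoop_reach (E : List (Int × Int)) (k : Nat) (S : PySem.Set Int)
    (hS : ∀ x ∈ S, Reach E x) : ∀ x ∈ closeLoop E k S, Reach E x := by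
  induction k generalizing S with
  | zero => exact hS
  | succ k ih =>
    intro x hx
    rw [show closeLoop E (k + 1) S
        = (if (passOnce E S).length = S.length then passOnce E S else closeLoop E k (passOnce E S))
        from rfl] at hx
    have hS' : ∀ y ∈ passOnce E S, Reach E y := by
      rw [passOnce_eq_foldl]
      exact foldPass_reach E E (fun _ h => h) S hS
    split at hx
    · exact hS' x hx
    · exact ih _ hS' x hx

theorem closeLoop_fix (E : List (Int × Int)) (k : Nat) (S : PySem.Set Int)
    (hk : E.length ≤ intCount E S + k) :
    passOnce E (closeLoop E k S) = closeLoop E k S := by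
  induction k generalizing S with
  | zero =>
    -- out of sweeps: every edge is already internal, a sweep is the identity
    have hcnt : intCount E S = E.length :=
      le_antisymm List.countP_le_length (by omega)
    have hall := List.countP_eq_length.mp hcnt
    show passOnce E S = S
    rw [passOnce_eq_foldl]
    apply foldPass_id
    intro ab hab
    have := hall ab hab
    simp only [Bool.and_eq_true, decide_eq_true_eq] at this
    exact this
  | succ k ih =>
    rw [show closeLoop E (k + 1) S
        = (if (passOnce E S).length = S.length then passOnce E S else closeLoop E k (passOnce E S))
        from rfl]
    split
    · -- the sweep added nothing: it was the identity, a fixpoint is reached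
      rename_i hlen
      have hSS : passOnce E S = S := by
        obtain ⟨t, ht⟩ := foldPass_append E S
        rw [passOnce_eq_foldl, ht]
        rw [passOnce_eq_foldl, ht] at hlen
        simp only [List.length_append] at hlen
        have : t = [] := List.eq_nil_of_length_eq_zero (by omega)
        rw [this, List.append_nil]
      rw [hSS, hSS]
    · -- the sweep grew the set: one more edge became internal, recurse
      rename_i hlen
      apply ih
      have hne : passOnce E S ≠ S := fun h => hlen (by rw [h])
      have := foldPass_progress E E (fun _ h => h) S (by rwa [← passOnce_eq_foldl])
      rw [← passOnce_eq_foldl] at this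
      omega

theorem reach_mem_of_fix (E : List (Int × Int)) (R : PySem.Set Int)
    (h1 : (1 : Int) ∈ R) (hfix : passOnce E R = R) (v : Int) (hv : Reach E v) : v ∈ R := by
  have hcl := foldPass_fix E R (by rwa [← passOnce_eq_foldl])
  unfold Reach at hv
  induction hv with
  | refl => exact h1
  | tail _ hbc ih =>
    rcases hbc with h' | h'
    · exact (hcl _ h' (Or.inl ih)).2
    · exact (hcl _ h' (Or.inr ih)).1

theorem solve_alt_isMax (N : Int) (A B : List Int) : CompMax (A.zip B) (solve_alt N A B) := by
  show CompMax (A.zip B)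
    ((PySem.List.max? (closeLoop (A.zip B) (A.zip B).length [1]) (fun x => x)).getD 0)
  set C := closeLoop (A.zip B) (A.zip B).length [1] with hC
  have h1 : (1 : Int) ∈ C := closeLoop_subset _ _ _ 1 (by simp)
  have hfix : passOnce (A.zip B) C = C :=
    closeLoop_fix (A.zip B) (A.zip B).length [1] (by omega)
  cases hm : PySem.List.max? C (fun x : Int => x) with
  | none =>
    rw [PySem.List.max?_eq_none_iff] at hm
    rw [hm] at h1
    cases h1
  | some m =>
    constructor
    · refine closeLoop_reach _ _ [1] ?_ m (PySem.List.max?_mem hm)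
      intro x hx
      rcases List.mem_singleton.mp hx with rfl
      exact Relation.ReflTransGen.refl
    · intro v hv
      exact PySem.List.max?_isMax hm v (reach_mem_of_fix _ _ h1 hfix v hv)

-- ---------- A side: the BFS returns the component maximum ----------

theorem bfsGo_isMax (E : List (Int × Int)) (ns : PySem.Set Int)
    (nears : PySem.Dict Int (List Int))
    (hn : ∀ k : Int, nears.getD k [] ≠ [] → k ∈ ns)
    (hE1 : ∀ k n : Int, n ∈ nears.getD k [] → Estep E k n)
    (hE2 : ∀ ab ∈ E, ab.2 ∈ nears.getD ab.1 [] ∧ ab.1 ∈ nears.getD ab.2 []) :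
    ∀ (visited : PySem.Dict Int Bool) (ans : Int) (que : List Int),
      (∀ v ∈ que, Reach E v) →
      (∀ v : Int, visited.getD v false = true → Reach E v) →
      (∀ a b : Int, Estep E a b → visited.getD a false = true →
        visited.getD b false = true ∨ b ∈ que) →
      (∀ v : Int, visited.getD v false = true → v ≤ ans) →
      (∀ v ∈ que, v ≤ ans) →
      Reach E ans →
      (visited.getD 1 false = true ∨ 1 ∈ que) →
      CompMax E (bfsGo ns nears hn visited ans que) := by
  intro visited ans que
  induction visited, ans, que using bfsGo.induct ns nears hn with
  | case1 visited ans =>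
    intro _ hvis hclose hansV _ hansR hone
    rw [bfsGo]
    refine ⟨hansR, fun v hv => ?_⟩
    have hv1 : visited.getD 1 false = true := by
      rcases hone with h | h
      · exact h
      · cases h
    have hall : ∀ w : Int, Reach E w → visited.getD w false = true := by
      intro w hw
      unfold Reach at hw
      induction hw with
      | refl => exact hv1
      | tail _ hbc ih =>
        rcases hclose _ _ hbc ih with h | h
        · exact h
        · cases h
    exact hansV v (hall v hv)
  | case2 visited ans current rest r ih =>
    intro hque hvis hclose hansV hansQ hansR hone
    set vd' := visited.insert current true with hvd'
    set F := (nears.getD current []).filter (fun n => !(vd'.getD n false)) with hFdef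
    have h0 : r = (nears.getD current []).foldl
        (fun (acc : List Int × Int) n =>
          if vd'.getD n false then acc
          else (acc.1 ++ [n], max acc.2 n)) (rest, ans) := rfl
    have hr1 : r.1 = rest ++ F := by rw [h0, bfsFold_eq]
    have hr2 : r.2 = F.foldl max ans := by rw [h0, bfsFold_eq]
    rw [bfsGo]
    rw [show (List.foldl
        (fun (acc : List Int × Int) n =>
          if vd'.getD n false then acc
          else (acc.1 ++ [n], max acc.2 n)) (rest, ans) (nears.getD current [])) = r from h0.symm]
    rw [hr1, hr2] at ih
    have hgd : ∀ x : Int, vd'.getD x false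
        = if x = current then true else visited.getD x false :=
      fun x => PySem.Dict.getD_insert visited current x true false
    have hRcur : Reach E current := hque current List.mem_cons_self
    have hFnear : ∀ x ∈ F, x ∈ nears.getD current [] :=
      fun x hx => List.mem_of_mem_filter hx
    have hFreach : ∀ x ∈ F, Reach E x := fun x hx =>
      Relation.ReflTransGen.tail hRcur (hE1 current x (hFnear x hx))
    have hFunvis : ∀ x ∈ F, vd'.getD x false = false := by
      intro x hx
      have := List.of_mem_filter hx
      simpa using this
    have hansle := PySem.List.le_foldl_max F ans
    rw [hr1, hr2]
    apply ih
    · -- que invariant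
      intro v hv
      rcases List.mem_append.mp hv with h | h
      · exact hque v (List.mem_cons_of_mem _ h)
      · exact hFreach v h
    · -- visited are reachable
      intro v hv
      rw [hgd] at hv
      by_cases hvc : v = current
      · exact hvc ▸ hRcur
      · exact hvis v (by rwa [if_neg hvc] at hv)
    · -- frontier closure
      intro a b hab hva
      rw [hgd] at hva
      by_cases hac : a = current
      · subst hac
        have hbnear : b ∈ nears.getD a [] := by
          rcases hab with h' | h'
          · exact (hE2 _ h').1
          · exact (hE2 _ h').2
        cases hvb : vd'.getD b false
        · right
          exact List.mem_append_right _ (List.mem_filter.mpr ⟨hbnear, by simp [hvb]⟩)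
        · left; rfl
      · rw [if_neg hac] at hva
        rcases hclose a b hab hva with h | h
        · left
          rw [hgd]
          by_cases hbc : b = current <;> simp [hbc, h]
        · rcases List.mem_cons.mp h with rfl | h'
          · left
            rw [hgd]
            simp
          · right
            exact List.mem_append_left _ h'
    · -- visited below the running max
      intro v hv
      rw [hgd] at hv
      by_cases hvc : v = current
      · exact le_trans (hvc ▸ hansQ current List.mem_cons_self) hansle.1
      · exact le_trans (hansV v (by rwa [if_neg hvc] at hv)) hansle.1
    · -- queue below the running max
      intro v hv
      rcases List.mem_append.mp hv with h | h
      · exact le_trans (hansQ v (List.mem_cons_of_mem _ h)) hansle.1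
      · exact hansle.2 v h
    · -- the running max stays reachable
      rcases PySem.List.foldl_max_mem F ans with h | h
      · rw [h]; exact hansR
      · exact hFreach _ h
    · -- node 1 stays visited-or-queued
      rcases hone with h | h
      · left
        rw [hgd]
        by_cases h1c : (1 : Int) = current <;> simp [h1c, h]
      · rcases List.mem_cons.mp h with h1c | h'
        · left
          rw [hgd, if_pos h1c]
        · right
          exact List.mem_append_left _ h'

theorem solve_isMax (N : Int) (A B : List Int) : CompMax (A.zip B) (solve N A B) := by
  unfold solve
  apply bfsGo_isMax (A.zip B) (nodeSet A B) (buildNears A B) (buildNears_dom A B)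
  · intro k n hkn
    rw [buildNears_mem] at hkn
    exact hkn
  · intro ab hab
    constructor
    · rw [buildNears_mem]
      left
      exact hab
    · rw [buildNears_mem]
      right
      exact hab
  · intro v hv
    rcases List.mem_singleton.mp hv with rfl
    exact Relation.ReflTransGen.refl
  · intro v hv
    rw [getD_initVisited] at hv
    cases hv
  · intro a b _ hva
    rw [getD_initVisited] at hva
    cases hva
  · intro v hv
    rw [getD_initVisited] at hv
    cases hv
  · intro v hv
    rcases List.mem_singleton.mp hv with rfl
    exact le_refl _
  · exact Relation.ReflTransGen.refl
  · right
    exact List.mem_singleton.mpr rfl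

-- ===== VERDICT (by name: the statement is the Claim_ definition above) =====
theorem solve_spec : Claim_equal_solve := by
  intro N A B _
  unfold Spec_solve
  exact isMax_unique (solve_isMax N A B) (solve_alt_isMax N A B)
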